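-- pv_equiv track=rewrite | github.com/Jianghanxiao/Dezhou_poke | dezhou.py | leftSZ
-- ===== SOURCE A (Python) =====
-- ALL_CARD_SYMBOL = ('0','A', '2', '3', '4', '5', '6', '7', '8', '9', '10', 'J', 'Q', 'K', 'A')
--
-- def shunzi(x, n):
--     if n == 0 or n > 10:
--         raise ValueError("Coding Bug")
--     cards = []
--     for i in range(5):
--         cards.append(x+ALL_CARD_SYMBOL[n+i])
--     return tuple(cards)
--
-- def leftSZ(pool):
--     all_ths = []
--     for number in range(1, 11):
--         all_ths.append(shunzi('a', number))
--
--     modified_pool = []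
--     for i in pool:
--         modified_pool.append("a" + i[1:])
--
--     min_left = 5
--     left = 0
--     for hjths in all_ths:
--         left = 0
--         for i in range(5):
--             if hjths[i] not in modified_pool:
--                 left += 1
--         min_left = min(left, min_left)
--     return min_left
-- ===== SOURCE B (Python) =====
-- ALL_CARD_SYMBOL = ('0','A', '2', '3', '4', '5', '6', '7', '8', '9', '10', 'J', 'Q', 'K', 'A')
--
-- def leftSZ(pool):
--     present = {"a" + c[1:] for c in pool}
--     have = [("a" + ALL_CARD_SYMBOL[k]) in present for k in range(15)]
--     cur = have[1] + have[2] + have[3] + have[4] + have[5]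
--     best = cur
--     for n in range(2, 11):
--         cur += have[n + 4] - have[n - 1]
--         best = max(best, cur)
--     return 5 - best
-- ===== Notes on version B (the rewrite author's own statement) =====
-- stated objective: faster
-- what changed: A tests each of the ten straights' five cards by scanning the pool list per card; B builds a presence set of normalized cards once, computes a presence table over the 15 card-symbol positions, and slides a width-5 window across it keeping a running count and a running maximum, returning 5 minus that maximum.
import Mathlib
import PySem

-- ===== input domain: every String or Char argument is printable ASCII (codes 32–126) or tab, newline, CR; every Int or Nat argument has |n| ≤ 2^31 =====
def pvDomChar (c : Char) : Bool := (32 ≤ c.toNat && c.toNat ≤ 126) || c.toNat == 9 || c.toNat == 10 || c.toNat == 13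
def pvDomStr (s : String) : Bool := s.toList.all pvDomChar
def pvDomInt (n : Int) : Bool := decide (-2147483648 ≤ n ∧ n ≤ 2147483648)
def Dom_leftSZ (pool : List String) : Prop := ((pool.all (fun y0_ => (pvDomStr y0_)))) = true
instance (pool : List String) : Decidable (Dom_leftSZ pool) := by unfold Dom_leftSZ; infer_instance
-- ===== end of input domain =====

-- B replaces A's ten per-straight membership scans over the pool by one presence set built once
-- plus a sliding 5-wide window over the 14 card positions (single pass).

-- ===== PORT A =====
def allCardSymbol : List String := ["0","A","2","3","4","5","6","7","8","9","10","J","Q","K","A"]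

def shunziA (x : String) (n : Int) : List String :=
  if n = 0 ∨ n > 10 then []
  else (PySem.List.pyRange 0 5 1).foldl
    (fun cards i => cards ++ [x ++ PySem.List.pyGetD allCardSymbol (n + i) ""]) []

def leftSZ (pool : List String) : Int :=
  let all_ths := (PySem.List.pyRange 1 11 1).foldl (fun acc number => acc ++ [shunziA "a" number]) []
  let modified_pool := pool.foldl (fun acc i => acc ++ ["a" ++ PySem.Str.slice i (some 1) none]) []
  all_ths.foldl (fun min_left hjths =>
    let left := (PySem.List.pyRange 0 5 1).foldl
      (fun left i => if PySem.List.pyGetD hjths i "" ∈ modified_pool then left else left + 1) (0 : Int)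
    min left min_left) (5 : Int)

-- ===== PORT B =====
def b2i : Bool → Int := fun b => if b then 1 else 0

def leftSZ_alt (pool : List String) : Int :=
  let present : PySem.Set String :=
    PySem.Set.ofList (pool.map (fun i => "a" ++ PySem.Str.slice i (some 1) none))
  let haveL : List Bool := (PySem.List.pyRange 0 15 1).map
    (fun k => PySem.Set.contains present ("a" ++ PySem.List.pyGetD allCardSymbol k ""))
  let cur0 : Int := b2i (PySem.List.pyGetD haveL 1 false) + b2i (PySem.List.pyGetD haveL 2 false)
    + b2i (PySem.List.pyGetD haveL 3 false) + b2i (PySem.List.pyGetD haveL 4 false)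
    + b2i (PySem.List.pyGetD haveL 5 false)
  let st := (PySem.List.pyRange 2 11 1).foldl
    (fun (st : Int × Int) n =>
      let cur := st.1 + b2i (PySem.List.pyGetD haveL (n + 4) false)
                      - b2i (PySem.List.pyGetD haveL (n - 1) false)
      (cur, max st.2 cur)) (cur0, cur0)
  5 - st.2


-- ===== PRECONDITION & SPEC =====
def Spec_leftSZ (pool : List String) (out : Int) : Prop := out = leftSZ_alt pool
instance (pool : List String) (out : Int) : Decidable (Spec_leftSZ pool out) := by unfold Spec_leftSZ; infer_instance

-- ===== CLAIM (what is proved, stated in full; the proofs are below) =====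
def Claim_equal_leftSZ : Prop := ∀ (pool : List String), Dom_leftSZ pool → Spec_leftSZ pool (leftSZ pool)

-- ===== LEMMAS AND PROOFS =====
theorem contains_ofList_eq (xs : List String) (x : String) :
    PySem.Set.contains (PySem.Set.ofList xs) x = decide (x ∈ xs) := by
  exact Bool.eq_iff_iff.mpr (by simp only [PySem.Set.contains_iff, decide_eq_true_eq, PySem.Set.mem_ofList])

theorem win_lemma (s1 s2 s3 s4 s5 : String) (mp : List String) :
    List.foldl (fun left i => if PySem.List.pyGetD ([s1,s2,s3,s4,s5] : List String) i "" ∈ mp then left else left + 1) (0:Int) (PySem.List.pyRange 0 5 1)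
      = 5 - (b2i (decide (s1 ∈ mp)) + b2i (decide (s2 ∈ mp)) + b2i (decide (s3 ∈ mp)) + b2i (decide (s4 ∈ mp)) + b2i (decide (s5 ∈ mp))) := by
  have hr5 : PySem.List.pyRange 0 5 1 = [0,1,2,3,4] := by decide
  have hi0 : PySem.List.pyIdx? 5 (0:Int) = some 0 := by decide
  have hi1 : PySem.List.pyIdx? 5 (1:Int) = some 1 := by decide
  have hi2 : PySem.List.pyIdx? 5 (2:Int) = some 2 := by decide
  have hi3 : PySem.List.pyIdx? 5 (3:Int) = some 3 := by decide
  have hi4 : PySem.List.pyIdx? 5 (4:Int) = some 4 := by decide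
  have hp0 : PySem.List.pyGetD ([s1,s2,s3,s4,s5] : List String) (0:Int) "" = s1 := by simp [PySem.List.pyGetD, PySem.List.pyGet?, hi0]
  have hp1 : PySem.List.pyGetD ([s1,s2,s3,s4,s5] : List String) (1:Int) "" = s2 := by simp [PySem.List.pyGetD, PySem.List.pyGet?, hi1]
  have hp2 : PySem.List.pyGetD ([s1,s2,s3,s4,s5] : List String) (2:Int) "" = s3 := by simp [PySem.List.pyGetD, PySem.List.pyGet?, hi2]
  have hp3 : PySem.List.pyGetD ([s1,s2,s3,s4,s5] : List String) (3:Int) "" = s4 := by simp [PySem.List.pyGetD, PySem.List.pyGet?, hi3]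
  have hp4 : PySem.List.pyGetD ([s1,s2,s3,s4,s5] : List String) (4:Int) "" = s5 := by simp [PySem.List.pyGetD, PySem.List.pyGet?, hi4]
  simp only [hr5, List.foldl_cons, List.foldl_nil, hp0, hp1, hp2, hp3, hp4, b2i, decide_eq_true_eq]
  split_ifs <;> omega

set_option maxHeartbeats 1600000 in
theorem leftSZ_probe (pool : List String) : leftSZ pool = leftSZ_alt pool := by
  simp only [leftSZ, leftSZ_alt, PySem.List.foldl_append_singleton_eq_map, List.nil_append]
  generalize pool.map (fun i => "a" ++ PySem.Str.slice i (some 1) none) = mp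
  simp only [contains_ofList_eq]
  have hmap : List.map (fun number => shunziA "a" number) (PySem.List.pyRange 1 11 1) = [["aA", "a2", "a3", "a4", "a5"], ["a2", "a3", "a4", "a5", "a6"], ["a3", "a4", "a5", "a6", "a7"], ["a4", "a5", "a6", "a7", "a8"], ["a5", "a6", "a7", "a8", "a9"], ["a6", "a7", "a8", "a9", "a10"], ["a7", "a8", "a9", "a10", "aJ"], ["a8", "a9", "a10", "aJ", "aQ"], ["a9", "a10", "aJ", "aQ", "aK"], ["a10", "aJ", "aQ", "aK", "aA"]] := by decide
  have hr15 : PySem.List.pyRange 0 15 1 = [0,1,2,3,4,5,6,7,8,9,10,11,12,13,14] := by decide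
  have hc0 : ("a" ++ PySem.List.pyGetD allCardSymbol (0 : Int) "") = "a0" := by decide
  have hc1 : ("a" ++ PySem.List.pyGetD allCardSymbol (1 : Int) "") = "aA" := by decide
  have hc2 : ("a" ++ PySem.List.pyGetD allCardSymbol (2 : Int) "") = "a2" := by decide
  have hc3 : ("a" ++ PySem.List.pyGetD allCardSymbol (3 : Int) "") = "a3" := by decide
  have hc4 : ("a" ++ PySem.List.pyGetD allCardSymbol (4 : Int) "") = "a4" := by decide
  have hc5 : ("a" ++ PySem.List.pyGetD allCardSymbol (5 : Int) "") = "a5" := by decide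
  have hc6 : ("a" ++ PySem.List.pyGetD allCardSymbol (6 : Int) "") = "a6" := by decide
  have hc7 : ("a" ++ PySem.List.pyGetD allCardSymbol (7 : Int) "") = "a7" := by decide
  have hc8 : ("a" ++ PySem.List.pyGetD allCardSymbol (8 : Int) "") = "a8" := by decide
  have hc9 : ("a" ++ PySem.List.pyGetD allCardSymbol (9 : Int) "") = "a9" := by decide
  have hc10 : ("a" ++ PySem.List.pyGetD allCardSymbol (10 : Int) "") = "a10" := by decide
  have hc11 : ("a" ++ PySem.List.pyGetD allCardSymbol (11 : Int) "") = "aJ" := by decide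
  have hc12 : ("a" ++ PySem.List.pyGetD allCardSymbol (12 : Int) "") = "aQ" := by decide
  have hc13 : ("a" ++ PySem.List.pyGetD allCardSymbol (13 : Int) "") = "aK" := by decide
  have hc14 : ("a" ++ PySem.List.pyGetD allCardSymbol (14 : Int) "") = "aA" := by decide
  have hmapB : List.map (fun k => decide (("a" ++ PySem.List.pyGetD allCardSymbol k "") ∈ mp)) (PySem.List.pyRange 0 15 1) = [decide (("a0":String) ∈ mp), decide (("aA":String) ∈ mp), decide (("a2":String) ∈ mp), decide (("a3":String) ∈ mp), decide (("a4":String) ∈ mp), decide (("a5":String) ∈ mp), decide (("a6":String) ∈ mp), decide (("a7":String) ∈ mp), decide (("a8":String) ∈ mp), decide (("a9":String) ∈ mp), decide (("a10":String) ∈ mp), decide (("aJ":String) ∈ mp), decide (("aQ":String) ∈ mp), decide (("aK":String) ∈ mp), decide (("aA":String) ∈ mp)] := by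
    simp only [hr15, List.map_cons, List.map_nil, hc0, hc1, hc2, hc3, hc4, hc5, hc6, hc7, hc8, hc9, hc10, hc11, hc12, hc13, hc14]
  have hr9 : PySem.List.pyRange 2 11 1 = [2,3,4,5,6,7,8,9,10] := by decide
  simp only [hmap, List.foldl_cons, List.foldl_nil, win_lemma]
  simp only [hmapB, hr9]
  generalize decide (("a0":String) ∈ mp) = z0
  generalize decide (("aA":String) ∈ mp) = z1
  generalize decide (("a2":String) ∈ mp) = z2
  generalize decide (("a3":String) ∈ mp) = z3
  generalize decide (("a4":String) ∈ mp) = z4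
  generalize decide (("a5":String) ∈ mp) = z5
  generalize decide (("a6":String) ∈ mp) = z6
  generalize decide (("a7":String) ∈ mp) = z7
  generalize decide (("a8":String) ∈ mp) = z8
  generalize decide (("a9":String) ∈ mp) = z9
  generalize decide (("a10":String) ∈ mp) = z10
  generalize decide (("aJ":String) ∈ mp) = z11
  generalize decide (("aQ":String) ∈ mp) = z12
  generalize decide (("aK":String) ∈ mp) = z13
  have hi1 : PySem.List.pyIdx? 15 (1:Int) = some 1 := by decide
  have hv1 : PySem.List.pyGetD ([z0, z1, z2, z3, z4, z5, z6, z7, z8, z9, z10, z11, z12, z13, z1] : List Bool) (1:Int) false = z1 := by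
    simp [PySem.List.pyGetD, PySem.List.pyGet?, hi1]
  have hi2 : PySem.List.pyIdx? 15 (2:Int) = some 2 := by decide
  have hv2 : PySem.List.pyGetD ([z0, z1, z2, z3, z4, z5, z6, z7, z8, z9, z10, z11, z12, z13, z1] : List Bool) (2:Int) false = z2 := by
    simp [PySem.List.pyGetD, PySem.List.pyGet?, hi2]
  have hi3 : PySem.List.pyIdx? 15 (3:Int) = some 3 := by decide
  have hv3 : PySem.List.pyGetD ([z0, z1, z2, z3, z4, z5, z6, z7, z8, z9, z10, z11, z12, z13, z1] : List Bool) (3:Int) false = z3 := by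
    simp [PySem.List.pyGetD, PySem.List.pyGet?, hi3]
  have hi4 : PySem.List.pyIdx? 15 (4:Int) = some 4 := by decide
  have hv4 : PySem.List.pyGetD ([z0, z1, z2, z3, z4, z5, z6, z7, z8, z9, z10, z11, z12, z13, z1] : List Bool) (4:Int) false = z4 := by
    simp [PySem.List.pyGetD, PySem.List.pyGet?, hi4]
  have hi5 : PySem.List.pyIdx? 15 (5:Int) = some 5 := by decide
  have hv5 : PySem.List.pyGetD ([z0, z1, z2, z3, z4, z5, z6, z7, z8, z9, z10, z11, z12, z13, z1] : List Bool) (5:Int) false = z5 := by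
    simp [PySem.List.pyGetD, PySem.List.pyGet?, hi5]
  have hi6 : PySem.List.pyIdx? 15 (6:Int) = some 6 := by decide
  have hv6 : PySem.List.pyGetD ([z0, z1, z2, z3, z4, z5, z6, z7, z8, z9, z10, z11, z12, z13, z1] : List Bool) (6:Int) false = z6 := by
    simp [PySem.List.pyGetD, PySem.List.pyGet?, hi6]
  have hi7 : PySem.List.pyIdx? 15 (7:Int) = some 7 := by decide
  have hv7 : PySem.List.pyGetD ([z0, z1, z2, z3, z4, z5, z6, z7, z8, z9, z10, z11, z12, z13, z1] : List Bool) (7:Int) false = z7 := by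
    simp [PySem.List.pyGetD, PySem.List.pyGet?, hi7]
  have hi8 : PySem.List.pyIdx? 15 (8:Int) = some 8 := by decide
  have hv8 : PySem.List.pyGetD ([z0, z1, z2, z3, z4, z5, z6, z7, z8, z9, z10, z11, z12, z13, z1] : List Bool) (8:Int) false = z8 := by
    simp [PySem.List.pyGetD, PySem.List.pyGet?, hi8]
  have hi9 : PySem.List.pyIdx? 15 (9:Int) = some 9 := by decide
  have hv9 : PySem.List.pyGetD ([z0, z1, z2, z3, z4, z5, z6, z7, z8, z9, z10, z11, z12, z13, z1] : List Bool) (9:Int) false = z9 := by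
    simp [PySem.List.pyGetD, PySem.List.pyGet?, hi9]
  have hi10 : PySem.List.pyIdx? 15 (10:Int) = some 10 := by decide
  have hv10 : PySem.List.pyGetD ([z0, z1, z2, z3, z4, z5, z6, z7, z8, z9, z10, z11, z12, z13, z1] : List Bool) (10:Int) false = z10 := by
    simp [PySem.List.pyGetD, PySem.List.pyGet?, hi10]
  have hi11 : PySem.List.pyIdx? 15 (11:Int) = some 11 := by decide
  have hv11 : PySem.List.pyGetD ([z0, z1, z2, z3, z4, z5, z6, z7, z8, z9, z10, z11, z12, z13, z1] : List Bool) (11:Int) false = z11 := by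
    simp [PySem.List.pyGetD, PySem.List.pyGet?, hi11]
  have hi12 : PySem.List.pyIdx? 15 (12:Int) = some 12 := by decide
  have hv12 : PySem.List.pyGetD ([z0, z1, z2, z3, z4, z5, z6, z7, z8, z9, z10, z11, z12, z13, z1] : List Bool) (12:Int) false = z12 := by
    simp [PySem.List.pyGetD, PySem.List.pyGet?, hi12]
  have hi13 : PySem.List.pyIdx? 15 (13:Int) = some 13 := by decide
  have hv13 : PySem.List.pyGetD ([z0, z1, z2, z3, z4, z5, z6, z7, z8, z9, z10, z11, z12, z13, z1] : List Bool) (13:Int) false = z13 := by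
    simp [PySem.List.pyGetD, PySem.List.pyGet?, hi13]
  have hi14 : PySem.List.pyIdx? 15 (14:Int) = some 14 := by decide
  have hv14 : PySem.List.pyGetD ([z0, z1, z2, z3, z4, z5, z6, z7, z8, z9, z10, z11, z12, z13, z1] : List Bool) (14:Int) false = z1 := by
    simp [PySem.List.pyGetD, PySem.List.pyGet?, hi14]
  simp only [List.foldl_cons, List.foldl_nil]
  norm_num [hv1, hv2, hv3, hv4, hv5, hv6, hv7, hv8, hv9, hv10, hv11, hv12, hv13, hv14]
  clear hv1 hv2 hv3 hv4 hv5 hv6 hv7 hv8 hv9 hv10 hv11 hv12 hv13 hv14 hi1 hi2 hi3 hi4 hi5 hi6 hi7 hi8 hi9 hi10 hi11 hi12 hi13 hi14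
  revert z1 z2 z3 z4 z5 z6 z7 z8 z9 z10 z11 z12 z13
  decide

-- ===== VERDICT (by name: the statement is the Claim_ definition above) =====
theorem leftSZ_spec : Claim_equal_leftSZ := by
  intro pool _
  unfold Spec_leftSZ
  exact leftSZ_probe pool
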